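-- pv_equiv track=rewrite | github.com/AlejandroFerrera/Codember-Python | 2023/c04/c04.py | is_real_file
-- ===== SOURCE A (Python) =====
-- def is_real_file(file_name: str) -> bool:
--
-- 	"""
-- 		File name: xyzz33-xy
-- 		Result: ✅ Real (The checksum is valid)
-- 		File name: abcca1-ab1
-- 		Result: ❌ Fake (The checksum should be b1, it's incorrect)
-- 		File name: abbc11-ca
-- 		Result: ❌ Fake (The checksum should be ac, the order is incorrect)
-- 		Each line indicates the file name and its corresponding checksum, separated by a hyphen (-).
-- 	"""
--
-- 	char_counter = {}
-- 	input, checksum = file_name.split('-')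
--
-- 	for char in input:
-- 		if char in char_counter:
-- 			char_counter[char] += 1
-- 		else:
-- 			char_counter[char] = 1
--
-- 	generated_checksum = ''
--
-- 	for key in char_counter.keys():
-- 		if char_counter[key] == 1:
-- 			valid_char = key
-- 			generated_checksum += valid_char
--
-- 	return generated_checksum == checksum
-- ===== SOURCE B (Python) =====
-- def is_real_file(file_name: str) -> bool:
--     input, checksum = file_name.split('-')
--     # One pass, no counting: keep the chars currently seen exactly once (in
--     # order) and a set of chars already seen twice; a char's second occurrence
--     # deletes it from the unique list and retires it into the duplicate set.
--     once = []
--     dup = set()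
--     for c in input:
--         if c in dup:
--             continue
--         if c in once:
--             once.remove(c)
--             dup.add(c)
--         else:
--             once.append(c)
--     return ''.join(once) == checksum
-- ===== Notes on version B (the rewrite author's own statement) =====
-- stated objective: alternative
-- what changed: A counts every char into a frequency dict and then re-walks the dict keys; B never counts: a single pass keeps an ordered list of chars currently seen exactly once and a set of retired duplicates, deleting a char from the list on its second occurrence.
import Mathlib
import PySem

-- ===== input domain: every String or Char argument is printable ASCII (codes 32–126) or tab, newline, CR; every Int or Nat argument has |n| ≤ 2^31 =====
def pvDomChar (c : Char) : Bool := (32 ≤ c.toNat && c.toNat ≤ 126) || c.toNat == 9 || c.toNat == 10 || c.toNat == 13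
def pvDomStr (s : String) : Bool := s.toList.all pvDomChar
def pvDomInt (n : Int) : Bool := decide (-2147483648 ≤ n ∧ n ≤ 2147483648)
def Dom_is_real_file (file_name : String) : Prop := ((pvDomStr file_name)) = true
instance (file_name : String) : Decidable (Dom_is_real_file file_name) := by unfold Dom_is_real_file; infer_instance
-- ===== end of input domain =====

-- B replaces A's count-then-rescan with a single pass that keeps the chars currently
-- seen exactly once and retires a char into a duplicate set on its second occurrence.

-- ===== PORT A =====
def is_real_file (file_name : String) : Bool :=
  match PySem.Str.split? file_name "-" with
  | some [input, checksum] =>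
    -- for char in input: if char in char_counter: += 1 else: = 1
    let char_counter : PySem.Dict Char Int := input.toList.foldl
      (fun d char => if d.contains char then d.insert char (d.getD char 0 + 1)
                     else d.insert char 1)
      PySem.Dict.empty
    -- for key in char_counter.keys(): if char_counter[key] == 1: generated_checksum += key
    let generated_checksum : List Char := char_counter.keys.foldl
      (fun acc key => if char_counter.getD key 0 == 1 then acc ++ [key] else acc) []
    generated_checksum == checksum.toList
  | _ => false   -- unreachable under Pre_ (split/unpack would raise ValueError)

-- ===== PORT B =====
-- the loop body of Source B: once/dup state, one char
def pvStepB (st : List Char × PySem.Set Char) (c : Char) : List Char × PySem.Set Char :=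
  if PySem.Set.contains st.2 c then st                         -- if c in dup: continue
  else if st.1.contains c then (st.1.erase c, PySem.Set.add st.2 c)  -- once.remove(c); dup.add(c)
  else (st.1 ++ [c], st.2)                                     -- once.append(c)

def is_real_file_alt (file_name : String) : Bool :=
  let parts := (PySem.Str.split? file_name "-").getD []
  if parts.length == 2 then
    -- input, checksum = file_name.split('-')
    let input := parts[0]!
    let checksum := parts[1]!
    let st := input.toList.foldl pvStepB ([], PySem.Set.empty)
    st.1 == checksum.toList                                    -- ''.join(once) == checksum
  else false   -- unreachable under Pre_ (the unpack would raise ValueError)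

-- ===== PRECONDITION & SPEC =====
-- Pre_ excludes exactly the inputs on which the two-way split/unpack raises
-- ValueError (file names without exactly one hyphen): A returns no value there.
def Pre_is_real_file (file_name : String) : Prop :=
  ((PySem.Str.split? file_name "-").getD []).length = 2
instance (file_name : String) : Decidable (Pre_is_real_file file_name) := by
  unfold Pre_is_real_file; infer_instance
def pvWitness_is_real_file : String := "xyzz33-xy"
def Spec_is_real_file (file_name : String) (out : Bool) : Prop := out = is_real_file_alt file_name
instance (file_name : String) (out : Bool) : Decidable (Spec_is_real_file file_name out) := by unfold Spec_is_real_file; infer_instance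

-- ===== CLAIM (what is proved, stated in full; the proofs are below) =====
def Claim_equal_is_real_file : Prop := ∀ (file_name : String), Dom_is_real_file file_name → Pre_is_real_file file_name → Spec_is_real_file file_name (is_real_file file_name)

-- ===== LEMMAS AND PROOFS =====

-- A's counting loop (with its in-dict branch) is Counter(input).
theorem pv_counter_loop (l : List Char) :
    l.foldl (fun d char => if d.contains char then d.insert char (d.getD char 0 + 1)
                           else d.insert char 1) PySem.Dict.empty
      = PySem.Dict.counter l := by
  rw [← PySem.Dict.foldl_insert_getD_add_one_eq_counter]
  apply List.foldl_ext
  intro d c _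
  by_cases h : d.contains c = true
  · simp [h]
  · simp only [Bool.not_eq_true] at h
    simp [h, PySem.Dict.getD_of_not_contains d 0 h]

-- filtering once-occurring elements commutes with first-occurrence dedup
theorem pv_filter_ofList (p : Char → Bool) (m : List Char)
    (h : ∀ c, p c = true → m.count c ≤ 1) :
    (PySem.Set.ofList m).filter p = m.filter p := by
  induction m using List.reverseRecOn with
  | nil => rfl
  | append_singleton xs x ih =>
    rw [PySem.Set.ofList_append_singleton]
    have hxs : ∀ c, p c = true → xs.count c ≤ 1 := by
      intro c hc
      have := h c hc
      simp [List.count_append] at this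
      omega
    by_cases hx : x ∈ xs
    · have hpx : p x = false := by
        by_contra hpx
        simp only [Bool.not_eq_false] at hpx
        have := h x hpx
        have h2 : 1 ≤ xs.count x := List.one_le_count_iff.mpr hx
        simp [List.count_append] at this
        omega
      have hmem : x ∈ PySem.Set.ofList xs := by
        rw [PySem.Set.mem_ofList]; exact hx
      rw [PySem.Set.add_of_mem hmem, ih hxs, List.filter_append]
      simp [hpx]
    · have hmem : x ∉ PySem.Set.ofList xs := by
        rw [PySem.Set.mem_ofList]; exact hx
      rw [PySem.Set.add_of_not_mem hmem, List.filter_append, List.filter_append,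
          ih hxs]

-- A's checksum-generation loop produces exactly the once-occurring chars in order
theorem pv_gen_eq_filter (l : List Char) :
    (PySem.Dict.counter l).keys.foldl
      (fun acc key => if (PySem.Dict.counter l).getD key 0 == 1 then acc ++ [key] else acc) []
      = l.filter (fun c => l.count c == 1) := by
  have h0 := PySem.List.foldl_append_if
    (fun key => (PySem.Dict.counter l).getD key 0 == 1) (fun x => x)
    (PySem.Dict.counter l).keys []
  simp only [List.nil_append, List.map_id'] at h0
  rw [h0, PySem.Dict.keys_counter]
  have hcongr : List.filter (fun key => (PySem.Dict.counter l).getD key 0 == 1)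
      (PySem.Set.ofList l) = List.filter (fun c => l.count c == 1) (PySem.Set.ofList l) := by
    apply List.filter_congr
    intro c _
    rw [PySem.Dict.getD_counter]
    simp
  rw [hcongr]
  apply pv_filter_ofList
  intro c hc
  simp [beq_iff_eq] at hc
  omega

-- B's single pass: invariant of the (once, dup) state over any processed prefix
theorem pv_loopB_inv (l : List Char) :
    (l.foldl pvStepB ([], PySem.Set.empty)).1 = l.filter (fun c => l.count c == 1) ∧
    ∀ c, PySem.Set.contains (l.foldl pvStepB ([], PySem.Set.empty)).2 c = true ↔ 2 ≤ l.count c := by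
  induction l using List.reverseRecOn with
  | nil =>
    refine ⟨rfl, fun c => ?_⟩
    simp [PySem.Set.empty]
  | append_singleton xs x ih =>
    obtain ⟨h1, h2⟩ := ih
    rw [List.foldl_append, List.foldl_cons, List.foldl_nil]
    set st := xs.foldl pvStepB ([], PySem.Set.empty) with hst
    have hcnt : ∀ c, (xs ++ [x]).count c = xs.count c + (if x = c then 1 else 0) := by
      intro c
      by_cases h : x = c <;> simp [List.count_append, h]
    by_cases hdup : PySem.Set.contains st.2 x = true
    · -- if c in dup: state unchanged
      have hx2 : 2 ≤ xs.count x := (h2 x).mp hdup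
      simp only [pvStepB, hdup, if_true]
      refine ⟨?_, fun c => ?_⟩
      · rw [h1, List.filter_append]
        have he : List.filter (fun c => (xs ++ [x]).count c == 1) [x] = [] := by
          simp
          omega
        rw [he, List.append_nil]
        apply List.filter_congr
        intro c hc
        by_cases hcx : c = x
        · have h2c : 2 ≤ xs.count c := by rw [hcx]; exact hx2
          rw [hcnt c, if_pos hcx.symm]
          have e1 : (xs.count c + 1 == 1) = false := by
            simp only [beq_eq_false_iff_ne, ne_eq]; omega
          have e2 : (xs.count c == 1) = false := by
            simp only [beq_eq_false_iff_ne, ne_eq]; omega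
          rw [e1, e2]
        · rw [hcnt c, if_neg (fun h => hcx h.symm), Nat.add_zero]
      · rw [h2 c, hcnt c]
        by_cases hcx : x = c
        · rw [if_pos hcx]
          have h2c : 2 ≤ xs.count c := by rw [← hcx]; exact hx2
          constructor <;> (intro; omega)
        · rw [if_neg hcx]; omega
    · have hle : xs.count x ≤ 1 := by
        by_contra h
        exact hdup ((h2 x).mpr (by omega))
      by_cases honce : st.1.contains x = true
      · -- second occurrence: once.remove(c); dup.add(c)
        have hx1 : xs.count x = 1 := by
          rw [h1] at honce
          simp only [List.contains_iff_mem, List.mem_filter, beq_iff_eq] at honce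
          exact honce.2
        simp only [pvStepB, hdup, honce, if_false, if_true, Bool.false_eq_true]
        refine ⟨?_, fun c => ?_⟩
        · have hnd : (List.filter (fun c => xs.count c == 1) xs).Nodup := by
            rw [List.nodup_iff_count_le_one]
            intro a
            by_cases hpa : xs.count a = 1
            · calc (List.filter (fun c => xs.count c == 1) xs).count a ≤ xs.count a :=
                    List.filter_sublist.count_le a
                _ ≤ 1 := le_of_eq hpa
            · have : a ∉ List.filter (fun c => xs.count c == 1) xs := by
                simp [List.mem_filter, hpa]
              rw [List.count_eq_zero.mpr this]; omega
          rw [h1, List.Nodup.erase_eq_filter hnd, List.filter_filter]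
          rw [List.filter_append]
          have he : List.filter (fun c => (xs ++ [x]).count c == 1) [x] = [] := by
            simp
            omega
          rw [he, List.append_nil]
          symm
          apply List.filter_congr
          intro c hc
          by_cases hcx : c = x
          · have h1c : xs.count c = 1 := by rw [hcx]; exact hx1
            rw [hcnt c, if_pos hcx.symm]
            have e1 : (xs.count c + 1 == 1) = false := by
              simp only [beq_eq_false_iff_ne, ne_eq]; omega
            have e2 : (c != x) = false := by simp [hcx]
            rw [e1, e2, Bool.false_and]
          · rw [hcnt c, if_neg (fun h => hcx h.symm), Nat.add_zero]
            have e2 : (c != x) = true := by simp [hcx]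
            rw [e2, Bool.true_and]
        · rw [PySem.Set.contains_iff, PySem.Set.mem_add, hcnt c]
          by_cases hcx : x = c
          · rw [if_pos hcx]
            have h1c : xs.count c = 1 := by rw [← hcx]; exact hx1
            constructor
            · intro; omega
            · intro; exact Or.inr hcx.symm
          · rw [if_neg hcx, Nat.add_zero]
            have hmem : c ∈ st.2 ↔ 2 ≤ xs.count c := by
              rw [← PySem.Set.contains_iff]; exact h2 c
            constructor
            · rintro (h | h)
              · exact hmem.mp h
              · exact absurd h.symm hcx
            · intro h; exact Or.inl (hmem.mpr h)
      · -- first occurrence: once.append(c)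
        have hx0 : x ∉ xs := by
          intro hmem
          have h1le : 1 ≤ xs.count x := List.one_le_count_iff.mpr hmem
          have hx1 : xs.count x = 1 := by omega
          have : x ∈ List.filter (fun c => xs.count c == 1) xs := by
            simp [List.mem_filter, hmem, hx1]
          rw [← h1] at this
          rw [List.contains_iff_mem] at honce
          exact honce this
        have hx0' : xs.count x = 0 := List.count_eq_zero.mpr hx0
        simp only [pvStepB, hdup, honce, if_false, Bool.false_eq_true]
        refine ⟨?_, fun c => ?_⟩
        · rw [List.filter_append]
          have he : List.filter (fun c => (xs ++ [x]).count c == 1) [x] = [x] := by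
            simp
            omega
          rw [he, h1]
          congr 1
          apply List.filter_congr
          intro c hc
          have hcx : x ≠ c := fun h => hx0 (h ▸ hc)
          rw [hcnt c, if_neg hcx, Nat.add_zero]
        · rw [h2 c, hcnt c]
          by_cases hcx : x = c
          · rw [if_pos hcx]
            have h0c : xs.count c = 0 := by rw [← hcx]; exact hx0'
            have hcon : PySem.Set.contains st.2 c = true ↔ 2 ≤ xs.count c := h2 c
            omega
          · rw [if_neg hcx]; omega

-- ===== VERDICT (by name: the statement is the Claim_ definition above) =====
theorem is_real_file_spec : Claim_equal_is_real_file := by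
  intro file_name _ hpre
  unfold Spec_is_real_file is_real_file is_real_file_alt
  unfold Pre_is_real_file at hpre
  rcases hs : PySem.Str.split? file_name "-" with _ | xs
  · simp [hs] at hpre
  · rcases xs with _ | ⟨a, _ | ⟨b, _ | ⟨c, t⟩⟩⟩
    · simp [hs] at hpre
    · simp [hs] at hpre
    · simp only [Option.getD_some]
      rw [pv_counter_loop, pv_gen_eq_filter]
      simp
      exact iff_of_eq (congrArg (fun s => s = b.toList) ((pv_loopB_inv a.toList).1).symm)
    · simp [hs] at hpre
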